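-- pv_equiv track=rewrite | github.com/BearMSU/Codewars | 7kyuKatas/7kyu-Count_number_of_zeros_from_1_to_N.py | count_zeros
-- ===== SOURCE A (Python) =====
-- def count_zeros(x):
--     # your code here
--     count = 0
--     for i in range(1, x + 1):
--         s = str(i)
--         for digit in s:
--             if digit == '0':
--                 count += 1
--     return count
-- ===== SOURCE B (Python) =====
-- def _zeros_in(n):
--     # number of zero digits of n (n >= 0); the leading digit is never zero
--     c = 0
--     while n > 9:
--         if n % 10 == 0:
--             c += 1
--         n //= 10
--     return c
--
--
-- def count_zeros(x):
--     # zeros in 1..x by grouping numbers as 10*q + d: O(log^2 x) instead of O(x log x)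
--     if x <= 0:
--         return 0
--     q, d = divmod(x, 10)
--     return q + 10 * count_zeros(q - 1) + (d + 1) * _zeros_in(q)
-- ===== Notes on version B (the rewrite author's own statement) =====
-- stated objective: faster
-- what changed: Replaces the per-number scan of 1..x (string-converting every number) by a decimal-digit recurrence on the quotient by ten, counting whole blocks of ten at once.
import Mathlib
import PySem

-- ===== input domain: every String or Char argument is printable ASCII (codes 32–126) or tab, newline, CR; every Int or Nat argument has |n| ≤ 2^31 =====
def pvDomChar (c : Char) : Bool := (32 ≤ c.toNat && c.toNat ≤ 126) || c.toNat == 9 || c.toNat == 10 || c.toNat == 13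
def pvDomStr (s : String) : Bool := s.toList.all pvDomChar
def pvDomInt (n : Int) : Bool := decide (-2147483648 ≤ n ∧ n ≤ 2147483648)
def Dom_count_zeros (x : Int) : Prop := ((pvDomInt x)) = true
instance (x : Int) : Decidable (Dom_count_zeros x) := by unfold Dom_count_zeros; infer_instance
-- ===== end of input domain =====

-- B counts zeros in 1..x by a digit recurrence on x//10 (O(log^2 x)) instead of A's scan of every number (faster, asymptotic).

-- ===== PORT A =====
def count_zeros (x : Int) : Int :=
  (PySem.List.pyRange 1 (x + 1) 1).foldl
    (fun count i =>
      (PySem.Int.toChars i).foldl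
        (fun count digit => if digit == '0' then count + 1 else count) count)
    0

-- ===== PORT B =====
-- number of zero digits of n (n >= 0); while-loop on n > 9 as recursion
def zeros_in (n : Int) : Int :=
  if h : 9 < n then
    (if PySem.Int.mod n 10 = 0 then 1 else 0) + zeros_in (PySem.Int.floordiv n 10)
  else 0
termination_by n.toNat
decreasing_by
  rw [PySem.Int.floordiv_eq_ediv_of_pos (by norm_num)]
  have h1 : n / 10 < n := Int.ediv_lt_of_lt_mul (by norm_num) (by omega)
  have h2 : 0 ≤ n / 10 := Int.ediv_nonneg (by omega) (by norm_num)
  omega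

def count_zeros_alt (x : Int) : Int :=
  if h : x ≤ 0 then 0
  else
    let q := PySem.Int.floordiv x 10
    let d := PySem.Int.mod x 10
    q + 10 * count_zeros_alt (q - 1) + (d + 1) * zeros_in q
termination_by x.toNat
decreasing_by
  have hq : PySem.Int.floordiv x 10 = x / 10 := PySem.Int.floordiv_eq_ediv_of_pos (by norm_num)
  have h1 : x / 10 ≤ x := Int.ediv_le_self _ (by omega)
  omega

-- ===== PRECONDITION & SPEC =====
def Spec_count_zeros (x : Int) (out : Int) : Prop := out = count_zeros_alt x
instance (x : Int) (out : Int) : Decidable (Spec_count_zeros x out) := by unfold Spec_count_zeros; infer_instance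

-- ===== CLAIM (what is proved, stated in full; the proofs are below) =====
def Claim_equal_count_zeros : Prop := ∀ (x : Int), Dom_count_zeros x → Spec_count_zeros x (count_zeros x)

-- ===== LEMMAS AND PROOFS =====

-- number of zero digits of n (leading digit excluded; it is never '0' for n ≥ 1)
def cnt (n : Nat) : Nat :=
  if n < 10 then 0 else (if n % 10 = 0 then 1 else 0) + cnt (n / 10)
decreasing_by exact Nat.div_lt_self (by omega) (by norm_num)

-- total zeros written in 1..n
def S : Nat → Nat
  | 0 => 0
  | n + 1 => S n + cnt (n + 1)

lemma digitChar_eq_zero_iff (m : Nat) (hm : m < 10) : Nat.digitChar m = '0' ↔ m = 0 := by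
  interval_cases m <;> simp [Nat.digitChar]

lemma count_toDigitsCore (f : Nat) : ∀ (n : Nat) (ds : List Char), 0 < n → n < f →
    (Nat.toDigitsCore 10 f n ds).count '0' = cnt n + ds.count '0' := by
  induction f with
  | zero => intro n ds h1 h2; omega
  | succ f ih =>
    intro n ds h1 h2
    rw [Nat.toDigitsCore]
    by_cases h10 : n / 10 = 0
    · have hn : n < 10 := by omega
      rw [if_pos h10]
      have : ¬ (Nat.digitChar (n % 10) = '0') := by
        rw [digitChar_eq_zero_iff _ (Nat.mod_lt _ (by norm_num))]; omega
      rw [cnt]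
      simp [this, hn, List.count]
    · rw [if_neg h10]
      have hlt : n / 10 < f := by
        have := Nat.div_lt_self h1 (show 1 < 10 by norm_num); omega
      rw [ih (n / 10) _ (by omega) hlt]
      have hge : ¬ n < 10 := by omega
      conv_rhs => rw [cnt]
      rw [if_neg hge, List.count_cons]
      by_cases hz : n % 10 = 0
      · simp [hz, Nat.digitChar]; omega
      · have : ¬ (Nat.digitChar (n % 10) = '0') := by
          rw [digitChar_eq_zero_iff _ (Nat.mod_lt _ (by norm_num))]; omega
        simp [hz, this]

lemma count_toChars (n : Nat) (h : 0 < n) :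
    (PySem.Int.toChars (n : Int)).count '0' = cnt n := by
  have : PySem.Int.toChars (n : Int) = Nat.toDigits 10 n := by
    simp [PySem.Int.toChars, Nat.toDigits]
  rw [this, Nat.toDigits]
  have := count_toDigitsCore (n + 1) n [] h (by omega)
  simpa using this

lemma A_eq (n : Nat) : count_zeros (n : Int) = (S n : Int) := by
  induction n with
  | zero =>
    simp [count_zeros, PySem.List.pyRange_one_eq_nil (by norm_num : (1:Int) ≥ 1), S]
  | succ n ih =>
    unfold count_zeros
    have hsplit : PySem.List.pyRange 1 (((n : Int) + 1) + 1) 1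
        = PySem.List.pyRange 1 ((n : Int) + 1) 1 ++ [(n : Int) + 1] := by
      exact PySem.List.pyRange_one_succ_right (by omega)
    push_cast
    rw [hsplit, List.foldl_append]
    unfold count_zeros at ih
    rw [ih, List.foldl_cons, List.foldl_nil]
    rw [PySem.List.foldl_count_if (fun digit => digit == '0')]
    have : ((n : Int) + 1) = ((n + 1 : Nat) : Int) := by push_cast; ring
    rw [this]
    have hc : (PySem.Int.toChars ((n + 1 : Nat) : Int)).countP (fun digit => digit == '0')
        = cnt (n + 1) := by
      rw [← count_toChars (n + 1) (by omega)]
      rfl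
    rw [hc, S]
    push_cast; ring

lemma zeros_in_eq (n : Nat) : zeros_in (n : Int) = (cnt n : Int) := by
  induction n using Nat.strong_induction_on with
  | _ n ih =>
    rw [zeros_in, cnt]
    by_cases h : n < 10
    · rw [dif_neg (by omega), if_pos h]; simp
    · rw [dif_pos (by omega), if_neg h]
      have hm : PySem.Int.mod (n : Int) 10 = ((n % 10 : Nat) : Int) := by
        exact_mod_cast PySem.Int.mod_natCast n 10
      have hf : PySem.Int.floordiv (n : Int) 10 = ((n / 10 : Nat) : Int) := by
        exact_mod_cast PySem.Int.floordiv_natCast n 10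
      rw [hm, hf]
      rw [ih (n / 10) (Nat.div_lt_self (by omega) (by norm_num))]
      by_cases hz : n % 10 = 0
      · simp [hz]
      · rw [if_neg (by exact_mod_cast hz), if_neg hz]
        push_cast; ring

lemma S_step (m : Nat) : S m = S (m - 1) + cnt m := by
  cases m with
  | zero => simp [S, cnt]
  | succ m => simp [S]

lemma S_rec (n : Nat) :
    S n = n / 10 + 10 * S (n / 10 - 1) + (n % 10 + 1) * cnt (n / 10) := by
  induction n with
  | zero => simp [S, cnt]
  | succ n ih =>
    by_cases h : (n + 1) % 10 = 0
    · -- last digit wraps: (n+1)/10 = n/10 + 1, n % 10 = 9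
      have hq : (n + 1) / 10 = n / 10 + 1 := by omega
      have h9 : n % 10 = 9 := by omega
      have hcnt : cnt (n + 1) = 1 + cnt ((n + 1) / 10) := by
        rw [cnt, if_neg (by omega), if_pos h]
      have hS1 : S (n + 1) = S n + cnt (n + 1) := rfl
      have hS2 : S (n / 10) = S (n / 10 - 1) + cnt (n / 10) := S_step _
      rw [hq] at hcnt ⊢
      rw [h9] at ih
      simp only [Nat.add_sub_cancel]
      rw [hS1, ih, hcnt]
      have e1 : (n + 1) % 10 = 0 := h
      rw [e1]
      omega
    · -- same prefix: (n+1)/10 = n/10, (n+1)%10 = n%10 + 1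
      have hq : (n + 1) / 10 = n / 10 := by omega
      have hd : (n + 1) % 10 = n % 10 + 1 := by omega
      have hcnt : cnt (n + 1) = cnt ((n + 1) / 10) := by
        rw [cnt]
        by_cases h10 : n + 1 < 10
        · rw [if_pos h10]
          have : (n + 1) / 10 = 0 := by omega
          rw [this]; simp [cnt]
        · rw [if_neg h10, if_neg h]; omega
      have hS1 : S (n + 1) = S n + cnt (n + 1) := rfl
      rw [hS1, ih, hcnt, hq, hd]
      ring

lemma B_eq (n : Nat) : count_zeros_alt (n : Int) = (S n : Int) := by
  induction n using Nat.strong_induction_on with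
  | _ n ih =>
    by_cases h0 : n = 0
    · subst h0; rw [count_zeros_alt]; simp [S]
    · rw [count_zeros_alt, dif_neg (by omega)]
      have hm : PySem.Int.mod (n : Int) 10 = ((n % 10 : Nat) : Int) := by
        exact_mod_cast PySem.Int.mod_natCast n 10
      have hf : PySem.Int.floordiv (n : Int) 10 = ((n / 10 : Nat) : Int) := by
        exact_mod_cast PySem.Int.floordiv_natCast n 10
      simp only [hm, hf]
      rw [zeros_in_eq]
      by_cases hq : n / 10 = 0
      · rw [hq]
        have halt : count_zeros_alt (-1) = 0 := by
          rw [count_zeros_alt]; simp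
        simp only [Nat.cast_zero, zero_sub]
        rw [halt]
        have := S_rec n
        rw [hq] at this
        rw [this]
        simp [S, cnt]
      · have hcast : ((n / 10 : Nat) : Int) - 1 = ((n / 10 - 1 : Nat) : Int) := by
          have : 1 ≤ n / 10 := by omega
          push_cast [this]; ring
        have hdlt : n / 10 < n := Nat.div_lt_self (by omega) (by norm_num)
        rw [hcast, ih (n / 10 - 1) (by omega)]
        have := S_rec n
        rw [this]
        push_cast; ring

-- ===== VERDICT (by name: the statement is the Claim_ definition above) =====
theorem count_zeros_spec : Claim_equal_count_zeros := by
  intro x _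
  unfold Spec_count_zeros
  by_cases hx : x ≤ 0
  · have hA : count_zeros x = 0 := by
      unfold count_zeros
      rw [PySem.List.pyRange_one_eq_nil (by omega)]
      rfl
    have hB : count_zeros_alt x = 0 := by rw [count_zeros_alt, dif_pos hx]
    rw [hA, hB]
  · have hx' : x = ((x.toNat : Nat) : Int) := by omega
    rw [hx', A_eq, B_eq]
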